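-- pv_equiv track=rewrite | github.com/KKOCAER/aws-risk-reporter | src/finding_mapper.py | _infer_privilege_level
-- ===== SOURCE A (Python) =====
-- def _infer_privilege_level(title: str, description: str, resource_type: str) -> str:
--     text = f"{title} {description} {resource_type}".lower()
--
--     if any(x in text for x in ["administrator", "admin", "wildcard"]):
--         return "admin"
--     if any(x in text for x in ["iam", "assume role", "permissions"]):
--         return "high"
--     if any(x in text for x in ["security group", "ssh", "port 22", "port 3389"]):
--         return "medium"
--     return "low"
-- ===== SOURCE B (Python) =====
-- _KEYWORD_RANK = {
--     "administrator": 0, "admin": 0, "wildcard": 0,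
--     "iam": 1, "assume role": 1, "permissions": 1,
--     "security group": 2, "ssh": 2, "port 22": 2, "port 3389": 2,
-- }
--
-- _LEVELS = ("admin", "high", "medium", "low")
--
--
-- def _infer_privilege_level(title: str, description: str, resource_type: str) -> str:
--     # Aggregate: take the best (smallest) severity rank among ALL matched
--     # keywords, defaulting to the 'low' rank; no grouped early returns.
--     text = " ".join((title, description, resource_type)).lower()
--     best = len(_LEVELS) - 1
--     for keyword, rank in _KEYWORD_RANK.items():
--         if keyword in text and rank < best:
--             best = rank
--     return _LEVELS[best]
-- ===== Notes on version B (the rewrite author's own statement) =====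
-- stated objective: alternative
-- what changed: Replaces the ordered if-cascade over keyword groups (first-match early return) by a single pass over a flat keyword-to-rank map that aggregates the minimum severity rank of all matched keywords and indexes a level tuple with it.
import Mathlib
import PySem

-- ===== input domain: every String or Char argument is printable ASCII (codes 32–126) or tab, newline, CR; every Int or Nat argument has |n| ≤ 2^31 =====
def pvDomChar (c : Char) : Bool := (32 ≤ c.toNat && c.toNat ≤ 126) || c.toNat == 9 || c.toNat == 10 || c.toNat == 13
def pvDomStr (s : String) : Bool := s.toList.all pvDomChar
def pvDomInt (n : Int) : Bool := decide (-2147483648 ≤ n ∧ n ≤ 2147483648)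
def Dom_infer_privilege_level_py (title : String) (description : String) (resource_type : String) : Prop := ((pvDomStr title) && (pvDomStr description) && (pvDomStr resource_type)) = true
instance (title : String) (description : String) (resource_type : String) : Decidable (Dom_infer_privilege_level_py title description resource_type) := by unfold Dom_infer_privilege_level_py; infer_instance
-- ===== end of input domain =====

-- B replaces A's grouped if-cascade with early returns by a single pass over a flat
-- keyword→rank map aggregating the minimum matched severity rank; same result, alternative algorithm.

-- ===== PORT A =====
def infer_privilege_level_py (title : String) (description : String) (resource_type : String) : String :=
  let text := PySem.Str.lower (title ++ " " ++ description ++ " " ++ resource_type)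
  if ["administrator", "admin", "wildcard"].any (fun x => PySem.Str.isIn x text) then "admin"
  else if ["iam", "assume role", "permissions"].any (fun x => PySem.Str.isIn x text) then "high"
  else if ["security group", "ssh", "port 22", "port 3389"].any (fun x => PySem.Str.isIn x text) then "medium"
  else "low"

-- ===== PORT B =====
-- flat keyword→rank map (insertion order of the Python dict)
def pvKeywordRank : List (String × Nat) :=
  [("administrator", 0), ("admin", 0), ("wildcard", 0),
   ("iam", 1), ("assume role", 1), ("permissions", 1),
   ("security group", 2), ("ssh", 2), ("port 22", 2), ("port 3389", 2)]

def pvLevels : List String := ["admin", "high", "medium", "low"]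

def infer_privilege_level_py_alt (title : String) (description : String) (resource_type : String) : String :=
  let text := PySem.Str.lower (PySem.Str.join " " [title, description, resource_type])
  -- the for-loop: best starts at len(_LEVELS)-1, lowered by every matched keyword of smaller rank
  let best := pvKeywordRank.foldl
    (fun best kr => if PySem.Str.isIn kr.1 text ∧ kr.2 < best then kr.2 else best)
    (pvLevels.length - 1)
  pvLevels.getD best "low"

-- ===== PRECONDITION & SPEC =====
def Spec_infer_privilege_level_py (title : String) (description : String) (resource_type : String) (out : String) : Prop := out = infer_privilege_level_py_alt title description resource_type
instance (title : String) (description : String) (resource_type : String) (out : String) : Decidable (Spec_infer_privilege_level_py title description resource_type out) := by unfold Spec_infer_privilege_level_py; infer_instance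

-- ===== CLAIM (what is proved, stated in full; the proofs are below) =====
def Claim_equal_infer_privilege_level_py : Prop := ∀ (title : String) (description : String) (resource_type : String), Dom_infer_privilege_level_py title description resource_type → Spec_infer_privilege_level_py title description resource_type (infer_privilege_level_py title description resource_type)

-- ===== LEMMAS AND PROOFS =====
theorem pvJoinEq (a b c : String) : PySem.Str.join " " [a, b, c] = a ++ " " ++ b ++ " " ++ c := by
  have h : (PySem.Str.join " " [a, b, c]).toList = (a ++ " " ++ b ++ " " ++ c).toList := by
    simp [PySem.Str.toList_join, PySem.Chars.join_cons_cons, PySem.Chars.join_singleton]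
  exact String.toList_inj.mp h

theorem pvFoldStep (t : String) (l : List (String × Nat)) (init : Nat) :
    l.foldl (fun best kr => if PySem.Str.isIn kr.1 t ∧ kr.2 < best then kr.2 else best) init
      = (l.map (fun kr => (PySem.Str.isIn kr.1 t, kr.2))).foldl
          (fun best kr => if kr.1 ∧ kr.2 < best then kr.2 else best) init := by
  rw [List.foldl_map]

theorem pvKey (b1 b2 b3 b4 b5 b6 b7 b8 b9 b10 : Bool) :
    (if (b1 || (b2 || (b3 || false))) = true then "admin"
     else if (b4 || (b5 || (b6 || false))) = true then "high"
     else if (b7 || (b8 || (b9 || (b10 || false)))) = true then "medium"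
     else "low") =
    ["admin", "high", "medium", "low"].getD
      (List.foldl (fun best kr => if kr.1 = true ∧ kr.2 < best then kr.2 else best)
        (["admin", "high", "medium", "low"].length - 1)
        [(b1, 0), (b2, 0), (b3, 0), (b4, 1), (b5, 1), (b6, 1), (b7, 2), (b8, 2), (b9, 2), (b10, 2)])
      "low" := by
  cases b1 <;> cases b2 <;> cases b3 <;> cases b4 <;> cases b5 <;> cases b6 <;> cases b7 <;> cases b8 <;> cases b9 <;> cases b10 <;> rfl

-- ===== VERDICT (by name: the statement is the Claim_ definition above) =====
theorem infer_privilege_level_py_spec : Claim_equal_infer_privilege_level_py := by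
  intro title description resource_type _
  unfold Spec_infer_privilege_level_py infer_privilege_level_py infer_privilege_level_py_alt
  rw [pvJoinEq]
  generalize PySem.Str.lower (title ++ " " ++ description ++ " " ++ resource_type) = t
  dsimp only
  rw [pvFoldStep]
  simp only [pvKeywordRank, pvLevels, List.map, List.any]
  exact pvKey _ _ _ _ _ _ _ _ _ _
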